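-- pv_equiv track=rewrite | github.com/Erenussocrates/My-Small-Python-Projects | Regular and Symmetrical Pattern Recognition.py | SimplePatternSuggest
-- ===== SOURCE A (Python) =====
-- def SimplePatternSuggest(string):
--   suggested_characters = set()
--
--   if len(string)>1:
--     if len(string) %2==1:
--       quotient, remainder=divmod(len(string),2)
--       part1 = string[:quotient + remainder]
--       part2 = string[quotient + remainder:]
--       check= all(part1[index]==part2[index] for index in range(len(part1)-1))
--       if check:
--         suggested_characters.add(part1[len(part1)-1])
--
--     for char in set(string):
--       extended_string = string + char
--       if extended_string == extended_string[::-1] and len(extended_string) > 1: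
--         suggested_characters.add(char)
--
--   return suggested_characters
-- ===== SOURCE B (Python) =====
-- def SimplePatternSuggest(string):
--     # Closed-form: the only char whose appension can make a palindrome is string[0],
--     # and the odd-length "period" check reduces to one slice comparison.
--     res = set()
--     n = len(string)
--     if n > 1:
--         if n % 2 == 1:
--             q = n // 2
--             if string[:q] == string[q + 1:]:
--                 res.add(string[q])
--         ext = string + string[0]
--         if ext == ext[::-1]:
--             res.add(string[0])
--     return res
-- ===== Notes on version B (the rewrite author's own statement) =====
-- stated objective: faster
-- what changed: Replaced the per-character loop over set(string) (each iteration building and reversing an n+1-char string) by a single palindrome test of string+string[0] -- the only character that can ever pass -- and reduced the odd-length element-by-element period check to one slice comparison.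
import Mathlib
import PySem

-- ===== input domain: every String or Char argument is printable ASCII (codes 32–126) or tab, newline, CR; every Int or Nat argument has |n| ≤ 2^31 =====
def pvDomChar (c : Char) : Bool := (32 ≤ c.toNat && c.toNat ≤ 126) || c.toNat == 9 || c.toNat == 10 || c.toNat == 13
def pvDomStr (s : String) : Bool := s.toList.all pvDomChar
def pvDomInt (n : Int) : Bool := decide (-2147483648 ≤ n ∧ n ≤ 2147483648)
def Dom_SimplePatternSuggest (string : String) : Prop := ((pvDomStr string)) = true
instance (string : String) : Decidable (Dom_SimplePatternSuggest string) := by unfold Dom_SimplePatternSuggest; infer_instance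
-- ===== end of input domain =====

-- B replaces A's loop over set(string) (each pass building and reversing string+char) by a single
-- palindrome test of string+string[0], and the element-wise period check by one slice comparison.

-- ===== PORT A =====
-- A-side helper: the test inside 'for char in set(string)':
-- 'extended_string == extended_string[::-1] and len(extended_string) > 1'
def pvA_extCheck (s : List Char) (c : Char) : Bool :=
  let ext := s ++ [c]
  match PySem.List.slice? ext none none (-1) with  -- extended_string[::-1]; step = -1 ≠ 0, never raises
  | some r => (ext == r) && decide (1 < ext.length)
  | none => false

def SimplePatternSuggest (string : String) : List String :=
  let s := string.toList
  let suggested : PySem.Set String := PySem.Set.empty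
  if 1 < s.length then
    let suggested :=
      if PySem.Int.mod (s.length : Int) 2 == 1 then
        match PySem.Int.divmod? (s.length : Int) 2 with
        | some (q, r) =>
          let part1 := PySem.List.slice s none (some (q + r))
          let part2 := PySem.List.slice s (some (q + r)) none
          let check := (PySem.List.pyRange 0 ((part1.length : Int) - 1) 1).all
            (fun i => PySem.List.pyGet? part1 i == PySem.List.pyGet? part2 i)
          if check then
            match PySem.List.pyGet? part1 ((part1.length : Int) - 1) with
            | some c => PySem.Set.add suggested (String.ofList [c])
            | none => suggested    -- unreachable: part1 nonempty
          else suggested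
        | none => suggested        -- unreachable: divisor 2 ≠ 0
      else suggested
    (PySem.Set.ofList s).foldl
      (fun acc c => if pvA_extCheck s c then PySem.Set.add acc (String.ofList [c]) else acc)
      suggested
  else suggested

-- ===== PORT B =====
def SimplePatternSuggest_alt (string : String) : List String :=
  let s := string.toList
  let n := s.length
  let res : PySem.Set String := PySem.Set.empty
  if 1 < n then
    let res :=
      if n % 2 == 1 then
        let q := n / 2
        if PySem.List.slice s none (some (q : Int)) == PySem.List.slice s (some ((q : Int) + 1)) none then
          PySem.Set.add res (String.ofList [s.getD q ' '])  -- string[q]; q < n, in range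
        else res
      else res
    let h := s.headD ' '        -- string[0]; s ≠ [] since 1 < n
    let ext := s ++ [h]
    match PySem.List.slice? ext none none (-1) with    -- ext[::-1]
    | some r => if ext == r then PySem.Set.add res (String.ofList [h]) else res
    | none => res                -- unreachable: step -1 ≠ 0
  else res

-- ===== PRECONDITION & SPEC =====
def Spec_SimplePatternSuggest (string : String) (out : List String) : Prop := out = SimplePatternSuggest_alt string
instance (string : String) (out : List String) : Decidable (Spec_SimplePatternSuggest string out) := by unfold Spec_SimplePatternSuggest; infer_instance

-- ===== CLAIM (what is proved, stated in full; the proofs are below) =====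
def Claim_equal_SimplePatternSuggest : Prop := ∀ (string : String), Dom_SimplePatternSuggest string → Spec_SimplePatternSuggest string (SimplePatternSuggest string)

-- ===== LEMMAS AND PROOFS =====

-- only the first character of s can pass the extended-palindrome test
theorem pvA_extCheck_eq_head (h : Char) (t : List Char) (c : Char)
    (hc : pvA_extCheck (h :: t) c = true) : c = h := by
  unfold pvA_extCheck at hc
  simp [pysem] at hc
  exact hc.2.2

theorem pv_fold_noop (s : List Char) (l : List Char) (acc : PySem.Set String)
    (hall : ∀ c ∈ l, pvA_extCheck s c = false) :
    l.foldl (fun acc c => if pvA_extCheck s c then PySem.Set.add acc (String.ofList [c]) else acc) acc = acc := by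
  induction l generalizing acc with
  | nil => rfl
  | cons c l ih =>
    simp only [List.foldl_cons, hall c (by simp)]
    exact ih acc (fun d hd => hall d (by simp [hd]))

theorem pv_fold_head (h : Char) (t : List Char) (l : List Char) (acc : PySem.Set String)
    (honly : ∀ c ∈ l, pvA_extCheck (h :: t) c = true → c = h)
    (hmem : h ∈ l) (hnd : l.Nodup) :
    l.foldl (fun acc c => if pvA_extCheck (h :: t) c = true then PySem.Set.add acc (String.ofList [c]) else acc) acc
      = if pvA_extCheck (h :: t) h then PySem.Set.add acc (String.ofList [h]) else acc := by
  induction l generalizing acc with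
  | nil => cases hmem
  | cons c l ih =>
    rcases List.nodup_cons.mp hnd with ⟨hcl, hnd'⟩
    by_cases hch : c = h
    · subst hch
      simp only [List.foldl_cons]
      apply pv_fold_noop
      intro d hd
      by_cases hdt : pvA_extCheck (c :: t) d = true
      · exact absurd (honly d (by simp [hd]) hdt ▸ hd) hcl
      · simpa using hdt
    · have hcf : pvA_extCheck (h :: t) c = false := by
        by_contra hc
        exact hch (honly c (by simp) (by simpa using hc))
      simp only [List.foldl_cons]
      rw [if_neg (by simp [hcf])]
      apply ih
      · exact fun d hd hdt => honly d (List.mem_cons_of_mem c hd) hdt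
      · rcases List.mem_cons.mp hmem with h1 | h1
        · exact absurd h1.symm hch
        · exact h1
      · exact hnd'

-- ===== VERDICT (by name: the statement is the Claim_ definition above) =====
-- the element-wise check of A's odd branch equals B's slice comparison
theorem pv_check_iff (s : List Char) (ho : s.length % 2 = 1) :
    ((PySem.List.pyRange 0 ((s.length / 2 : Nat) : Int) 1).all
       (fun i => PySem.List.pyGet? (s.take (s.length / 2 + 1)) i == PySem.List.pyGet? (s.drop (s.length / 2 + 1)) i))
    = (s.take (s.length / 2) == s.drop (s.length / 2 + 1)) := by
  have hq : 2 * (s.length / 2) + 1 = s.length := by omega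
  set q := s.length / 2 with hqdef
  rw [Bool.eq_iff_iff]
  rw [PySem.List.pyRange_zero_natCast]
  simp only [List.all_map, List.all_eq_true, List.mem_range, Function.comp,
    PySem.List.pyGet?_natCast, beq_iff_eq]
  constructor
  · intro hall
    apply List.ext_getElem?
    intro i
    by_cases hi : i < q
    · rw [List.getElem?_take_of_lt hi]
      have h1 := hall i hi
      rw [List.getElem?_take_of_lt (by omega)] at h1
      exact h1
    · rw [List.getElem?_eq_none (by simp [List.length_take]; omega),
        List.getElem?_eq_none (by simp [List.length_drop]; omega)]
  · intro heq k hk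
    rw [List.getElem?_take_of_lt (by omega : k < q + 1)]
    rw [← List.getElem?_take_of_lt hk, heq]

theorem SimplePatternSuggest_spec : Claim_equal_SimplePatternSuggest := by
  intro string _
  show SimplePatternSuggest string = SimplePatternSuggest_alt string
  simp only [SimplePatternSuggest, SimplePatternSuggest_alt]
  generalize string.toList = s
  by_cases hn : 1 < s.length
  · rw [if_pos hn, if_pos hn]
    obtain ⟨h, t, hst⟩ : ∃ h t, s = h :: t := by
      cases s with
      | nil => simp at hn
      | cons a b => exact ⟨a, b, rfl⟩
    have hmod : PySem.Int.mod (s.length : Int) 2 = ((s.length % 2 : Nat) : Int) := by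
      exact_mod_cast PySem.Int.mod_natCast s.length 2
    have hdm : PySem.Int.divmod? (s.length : Int) 2
        = some (((s.length / 2 : Nat) : Int), ((s.length % 2 : Nat) : Int)) := by
      simp [PySem.Int.divmod?]
      constructor
      · exact_mod_cast PySem.Int.floordiv_natCast s.length 2
      · exact_mod_cast PySem.Int.mod_natCast s.length 2
    -- the two accumulators after the odd-length branch are equal
    have hacc : (if PySem.Int.mod (s.length : Int) 2 == 1 then
        match PySem.Int.divmod? (s.length : Int) 2 with
        | some (q, r) =>
          let part1 := PySem.List.slice s none (some (q + r))
          let part2 := PySem.List.slice s (some (q + r)) none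
          let check := (PySem.List.pyRange 0 ((part1.length : Int) - 1) 1).all
            (fun i => PySem.List.pyGet? part1 i == PySem.List.pyGet? part2 i)
          if check then
            match PySem.List.pyGet? part1 ((part1.length : Int) - 1) with
            | some c => PySem.Set.add PySem.Set.empty (String.ofList [c])
            | none => PySem.Set.empty
          else PySem.Set.empty
        | none => PySem.Set.empty
      else (PySem.Set.empty : PySem.Set String))
      = (if s.length % 2 == 1 then
          if PySem.List.slice s none (some ((s.length / 2 : Nat) : Int))
              == PySem.List.slice s (some (((s.length / 2 : Nat) : Int) + 1)) none then
            PySem.Set.add PySem.Set.empty (String.ofList [s.getD (s.length / 2) ' '])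
          else PySem.Set.empty
        else (PySem.Set.empty : PySem.Set String)) := by
      by_cases ho : s.length % 2 = 1
      · rw [hmod, hdm, ho]
        have hq : s.length / 2 < s.length := by omega
        have e1 : ((s.length / 2 : Nat) : Int) + ((1 : Nat) : Int) = ((s.length / 2 + 1 : Nat) : Int) := by
          push_cast; ring
        have e1' : ((s.length / 2 : Nat) : Int) + 1 = ((s.length / 2 + 1 : Nat) : Int) := by
          push_cast; ring
        simp only [e1, e1', PySem.List.slice_to_natCast, PySem.List.slice_from_natCast]
        have hlen1 : (s.take (s.length / 2 + 1)).length = s.length / 2 + 1 := by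
          simp [List.length_take]; omega
        rw [hlen1]
        have e2 : ((s.length / 2 + 1 : Nat) : Int) - 1 = ((s.length / 2 : Nat) : Int) := by
          push_cast; ring
        rw [e2, pv_check_iff s ho]
        have t1 : ((((1 : Nat) : Int)) == 1) = true := by norm_num
        have t2 : ((1 : Nat) == 1) = true := rfl
        rw [t1, t2]
        simp only [if_true]
        by_cases hck : (List.take (s.length / 2) s == List.drop (s.length / 2 + 1) s) = true
        · rw [if_pos hck, if_pos hck, PySem.List.pyGet?_natCast]
          have hget : (s.take (s.length / 2 + 1))[s.length / 2]? = some s[s.length / 2] := by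
            simp [hq]
          have hgd : s.getD (s.length / 2) ' ' = s[s.length / 2] := by
            simp [List.getD_eq_getElem?_getD, List.getElem?_eq_getElem hq]
          rw [hget, hgd]
        · rw [if_neg hck, if_neg hck]
      · have h2 : s.length % 2 = 0 := by omega
        simp [h2]
        intro hx
        exfalso
        omega
    rw [hacc, hst]
    have hrev : PySem.List.slice? ((h :: t) ++ [(h :: t).headD ' ']) none none (-1)
        = some ((h :: t) ++ [(h :: t).headD ' ']).reverse := by simp [pysem]
    rw [hrev]
    rw [pv_fold_head h t _ _ (fun c _ hc => pvA_extCheck_eq_head h t c hc)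
      (by simp [PySem.Set.mem_ofList]) (PySem.Set.nodup_ofList _)]
    have hcnd : pvA_extCheck (h :: t) h = ((h :: t) ++ [(h :: t).headD ' ']
        == ((h :: t) ++ [(h :: t).headD ' ']).reverse) := by
      unfold pvA_extCheck
      simp [pysem]
    rw [hcnd]
    simp only [List.headD_cons]
    rfl
  · rw [if_neg hn, if_neg hn]
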